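-- pv_equiv track=rewrite | github.com/pypi-data/pypi-mirror-13 | packages/musicode/musicode-0.1.tar.gz/musicode-0.1/musicode.py | col_align
-- ===== SOURCE A (Python) =====
-- def col_align(rows, left=True):
--     """
--     2D list column align
--
--     :param list|tuple rows: rows
--     :param bool left: default True
--     :rtype: list
--     """
--     cols = [list(c) for c in zip(*rows)]
--
--     # Get max length for each column
--     max_len = [max([len(item) for item in col]) for col in cols]
--
--     # add space
--     for i, col in enumerate(cols):
--         for j, elem in enumerate(col):
--             if left:
--                 col[j] += ' ' * (max_len[i] - len(elem))
--             else:
--                 col[j] = ' ' * (max_len[i] - len(elem)) + col[j]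
--
--     return [list(r) for r in zip(*cols)]
-- ===== SOURCE B (Python) =====
-- def col_align(rows, left=True):
--     """2D list column align by recursive column peeling: pad the first column
--     (max computed inline), recurse on the row tails, cons the results back."""
--     if not rows or any(not r for r in rows):
--         return []
--
--     def go(rs):
--         if any(not r for r in rs):
--             return [[] for _ in rs]
--         w = max(len(r[0]) for r in rs)
--
--         def pad(s):
--             return s + ' ' * (w - len(s)) if left else ' ' * (w - len(s)) + s
--
--         rest = go([r[1:] for r in rs])
--         return [[pad(r[0])] + t for r, t in zip(rs, rest)]
--
--     return go(rows)
-- ===== Notes on version B (the rewrite author's own statement) =====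
-- stated objective: alternative
-- what changed: Replaces A's staged passes (zip-transpose, width table, in-place padding loop, zip-transpose back) with a single structural recursion that peels one column at a time: pad the heads with an inline max and cons them onto the recursive result of the row tails; no transposes, no width table, no indexing.
import Mathlib
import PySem

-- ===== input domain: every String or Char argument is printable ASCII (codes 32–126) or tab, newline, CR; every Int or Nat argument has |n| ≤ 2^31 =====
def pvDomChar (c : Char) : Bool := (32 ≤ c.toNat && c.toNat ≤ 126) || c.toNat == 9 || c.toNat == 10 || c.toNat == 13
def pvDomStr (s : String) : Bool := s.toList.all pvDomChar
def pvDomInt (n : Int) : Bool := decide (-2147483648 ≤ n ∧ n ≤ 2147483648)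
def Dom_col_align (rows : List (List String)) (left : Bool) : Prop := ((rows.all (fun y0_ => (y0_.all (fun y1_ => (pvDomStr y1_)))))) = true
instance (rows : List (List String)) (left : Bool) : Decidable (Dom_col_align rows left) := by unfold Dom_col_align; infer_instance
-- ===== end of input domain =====

-- B replaces A's transpose/width-table/transpose-back passes with one structural recursion peeling a column at a time; same values, slower on wide tables since the tail slices copy (objective: alternative).

-- ===== PORT A =====
-- exact port of Python's zip(*rows) (as lists): truncates to the shortest row; [] when rows == [] or some row is empty
def pvZipStar (rows : List (List String)) : List (List String) :=
  (List.range ((PySem.List.min? (rows.map List.length) (fun x => x)).getD 0)).map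
    (fun i => rows.map (fun r => r.getD i ""))

def col_align (rows : List (List String)) (left : Bool) : List (List String) :=
  let cols := pvZipStar rows
  -- max([...]) : Python raises on an empty list, but every col here is nonempty (zip truncation), so the .getD 0 default is unreachable
  let maxLen := cols.map (fun col =>
    (PySem.List.max? (col.map (fun item => item.toList.length)) (fun x => x)).getD 0)
  -- the in-place loop 'for i, col in enumerate(cols): for j, elem in enumerate(col): …' rebuilds each cell;
  -- max_len[i] - len(elem) is ≥ 0 (max over the column), so Nat subtraction is exact here
  let cols2 := (PySem.List.enumerate cols).map (fun ic =>
    (PySem.List.enumerate ic.2).map (fun je =>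
      if left then
        String.ofList (je.2.toList ++ List.replicate (PySem.List.pyGetD maxLen ic.1 0 - je.2.toList.length) ' ')
      else
        String.ofList (List.replicate (PySem.List.pyGetD maxLen ic.1 0 - je.2.toList.length) ' ' ++ je.2.toList)))
  pvZipStar cols2

-- ===== PORT B =====
-- Source B's pad(s): 's + " "*(w-len(s)) if left else " "*(w-len(s)) + s' (Nat subtraction = Python's, the pad count is never negative)
def pvPad (left : Bool) (w : Nat) (s : String) : String :=
  if left then String.ofList (s.toList ++ List.replicate (w - s.toList.length) ' ')
  else String.ofList (List.replicate (w - s.toList.length) ' ' ++ s.toList)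

-- Source B's go: pad the heads (r[0]; guarded nonempty, so headD's default is unreachable), recurse on the tails.
-- The 'rs = []' disjunct only makes the recursion total: go is never called with no rows (the caller guards rows = []).
def col_align_go (rs : List (List String)) (left : Bool) : List (List String) :=
  if _h : rs.any (fun r => r.isEmpty) = true ∨ rs = [] then rs.map (fun _ => ([] : List String))
  else
    let w := (PySem.List.max? (rs.map (fun r => (r.headD "").toList.length)) (fun x => x)).getD 0
    let rest := col_align_go (rs.map List.tail) left
    (rs.zip rest).map (fun p => pvPad left w (p.1.headD "") :: p.2)
termination_by (rs.headD []).length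
decreasing_by
  rcases rs with _ | ⟨r0, t⟩
  · exact absurd rfl (fun h => _h (Or.inr h))
  · have hr0 : r0 ≠ [] := by
      intro h; exact _h (Or.inl (by simp [h]))
    simp only [List.attach_cons, List.map_cons, List.headD_cons, List.length_tail]
    exact Nat.sub_lt (List.length_pos_iff.mpr hr0) Nat.one_pos

def col_align_alt (rows : List (List String)) (left : Bool) : List (List String) :=
  if rows = [] ∨ rows.any (fun r => r.isEmpty) then []
  else col_align_go rows left

-- ===== PRECONDITION & SPEC =====
def Spec_col_align (rows : List (List String)) (left : Bool) (out : List (List String)) : Prop := out = col_align_alt rows left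
instance (rows : List (List String)) (left : Bool) (out : List (List String)) : Decidable (Spec_col_align rows left out) := by unfold Spec_col_align; infer_instance

-- ===== CLAIM (what is proved, stated in full; the proofs are below) =====
def Claim_equal_col_align : Prop := ∀ (rows : List (List String)) (left : Bool), Dom_col_align rows left → Spec_col_align rows left (col_align rows left)

-- ===== LEMMAS AND PROOFS =====

-- the common middle form both programs are reduced to: each row rebuilt over the truncated column range
def pvMinLen (rows : List (List String)) : Nat :=
  (PySem.List.min? (rows.map List.length) (fun x => x)).getD 0

def pvW (rows : List (List String)) (i : Nat) : Nat :=
  (PySem.List.max? (rows.map (fun r => (r.getD i "").toList.length)) (fun x => x)).getD 0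

def pvMid (rows : List (List String)) (left : Bool) : List (List String) :=
  rows.map (fun r => (List.range (pvMinLen rows)).map (fun i => pvPad left (pvW rows i) (r.getD i "")))

-- a map written as a map over the index range
theorem pv_map_eq_range_map {α β : Type} (d : α) (l : List α) (g : α → β) :
    l.map g = (List.range l.length).map (fun j => g (l.getD j d)) := by
  apply List.ext_getElem
  · simp
  · intro j h1 h2
    have hj : j < l.length := by simpa using h1
    simp [List.getD_eq_getElem?_getD, List.getElem?_eq_getElem hj]

theorem pv_getD_map_valid {α β : Type} (l : List α) (f : α → β) (j : Nat) (hj : j < l.length)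
    (d : α) (d' : β) : (l.map f).getD j d' = f (l.getD j d) := by
  simp [List.getD_eq_getElem?_getD, hj]

-- min? over a list whose elements are all equal
theorem pv_min?_getD_all_eq {l : List Nat} {R : Nat} (hne : l ≠ []) (h : ∀ x ∈ l, x = R) :
    (PySem.List.min? l (fun x => x)).getD 0 = R := by
  cases hmin : PySem.List.min? l (fun x => x) with
  | none => exact absurd ((PySem.List.min?_eq_none_iff l _).mp hmin) hne
  | some m => simpa using h m (PySem.List.min?_mem hmin)

-- pvZipStar of a nonempty rectangular table (all rows of length R)
theorem pv_zipStar_rect {cs : List (List String)} {R : Nat} (hne : cs ≠ [])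
    (h : ∀ c ∈ cs, c.length = R) :
    pvZipStar cs = (List.range R).map (fun j => cs.map (fun c => c.getD j "")) := by
  unfold pvZipStar
  have : (PySem.List.min? (cs.map List.length) (fun x => x)).getD 0 = R := by
    apply pv_min?_getD_all_eq (by simpa using hne)
    intro x hx
    rcases List.mem_map.mp hx with ⟨c, hc, rfl⟩
    exact h c hc
  rw [this]

-- some row of rows is empty  ↔  pvMinLen rows = 0  (for nonempty rows)
theorem pv_minLen_zero_iff {rows : List (List String)} (hne : rows ≠ []) :
    pvMinLen rows = 0 ↔ rows.any (fun r => r.isEmpty) = true := by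
  unfold pvMinLen
  cases hmin : PySem.List.min? (rows.map List.length) (fun x => x) with
  | none => exact absurd ((PySem.List.min?_eq_none_iff _ _).mp hmin) (by simpa using hne)
  | some m =>
    simp only [Option.getD_some]
    constructor
    · intro hm
      subst hm
      have hmem := PySem.List.min?_mem hmin
      rcases List.mem_map.mp hmem with ⟨r, hr, hlen⟩
      have hre : r = [] := List.length_eq_zero_iff.mp hlen
      exact List.any_eq_true.mpr ⟨r, hr, by simp [hre]⟩
    · intro hany
      rcases List.any_eq_true.mp hany with ⟨r, hr, hre⟩
      have h0 : (0 : Nat) ∈ rows.map List.length :=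
        List.mem_map.mpr ⟨r, hr, by simpa [List.isEmpty_iff] using hre⟩
      have := PySem.List.min?_isMin hmin 0 h0
      omega

-- A equals pvMid when rows is nonempty and has no empty row
theorem pv_A_eq_mid (rows : List (List String)) (left : Bool)
    (_hr : rows ≠ []) (hm : pvMinLen rows ≠ 0) :
    col_align rows left = pvMid rows left := by
  set m := pvMinLen rows with hmdef
  set padf : Nat → String → String := fun w e =>
    if left then String.ofList (e.toList ++ List.replicate (w - e.toList.length) ' ')
    else String.ofList (List.replicate (w - e.toList.length) ' ' ++ e.toList) with hpadf
  have hcols : pvZipStar rows = (List.range m).map (fun i => rows.map (fun r => r.getD i "")) := by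
    unfold pvZipStar; rw [show (PySem.List.min? (rows.map List.length) (fun x => x)).getD 0 = m from rfl]
  have hcols2 :
      (PySem.List.enumerate ((List.range m).map (fun i => rows.map (fun r => r.getD i "")))).map (fun ic =>
        (PySem.List.enumerate ic.2).map (fun je =>
          padf (PySem.List.pyGetD (((List.range m).map (fun i => rows.map (fun r => r.getD i ""))).map (fun col =>
            (PySem.List.max? (col.map (fun item => item.toList.length)) (fun x => x)).getD 0)) ic.1 0) je.2))
      = (List.range m).map (fun i => rows.map (fun r => padf (pvW rows i) (r.getD i ""))) := by
    apply List.ext_getElem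
    · simp [PySem.List.length_enumerate]
    · intro k h1 h2
      rw [List.getElem_map, List.getElem_map, PySem.List.getElem_enumerate]
      have hk : k < m := by simpa [PySem.List.length_enumerate] using h1
      simp only [List.getElem_map, List.getElem_range, zero_add, PySem.List.pyGetD_natCast]
      rw [List.map_map, pv_getD_map_valid (List.range m) _ k (by simpa) 0,
        List.getD_eq_getElem (List.range m) 0 (by simpa), List.getElem_range]
      apply List.ext_getElem
      · simp [PySem.List.length_enumerate]
      · intro j j1 j2
        rw [List.getElem_map, PySem.List.getElem_enumerate, List.getElem_map]
        simp [pvW, Function.comp_def, List.map_map]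
  have hcols2if := congrArg pvZipStar hcols2
  simp only [hpadf] at hcols2if
  simp only [col_align, hcols]
  rw [hcols2if]
  have hnonnil : ((List.range m).map (fun i => rows.map (fun r => padf (pvW rows i) (r.getD i "")))) ≠ [] := by
    intro hcontra
    have := congrArg List.length hcontra
    simp at this
    omega
  rw [pv_zipStar_rect (R := rows.length) hnonnil
    (by intro c hc; rcases List.mem_map.mp hc with ⟨i, _, rfl⟩; simp)]
  unfold pvMid
  rw [← hmdef, pv_map_eq_range_map ([] : List String) rows]
  apply List.ext_getElem
  · simp
  · intro j h1 h2
    simp only [List.getElem_map, List.getElem_range]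
    have hj : j < rows.length := by simpa using h1
    rw [List.map_map]
    apply List.map_congr_left
    intro i hi
    simp only [Function.comp]
    rw [pv_getD_map_valid rows _ j hj []]
    cases left <;> simp [hpadf, pvPad]

-- Nat min commutes with subtracting one
theorem pv_foldl_min_sub_one (t : List Nat) (x : Nat) :
    (t.map (fun n => n - 1)).foldl min (x - 1) = t.foldl min x - 1 := by
  induction t generalizing x with
  | nil => rfl
  | cons a t ih =>
    simp only [List.map_cons, List.foldl_cons]
    rw [show min (x - 1) (a - 1) = min x a - 1 by omega]
    exact ih (min x a)

theorem pv_minLen_tail (rows : List (List String)) :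
    pvMinLen (rows.map List.tail) = pvMinLen rows - 1 := by
  rcases rows with _ | ⟨r, t⟩
  · rfl
  · unfold pvMinLen
    simp only [List.map_cons, List.map_map]
    have hmm : (t.map (List.length ∘ List.tail)) = (t.map List.length).map (fun n => n - 1) := by
      simp [List.map_map, Function.comp_def]
    rw [hmm, PySem.List.min?_id_cons, PySem.List.min?_id_cons]
    simp only [Option.getD_some, List.length_tail]
    exact pv_foldl_min_sub_one (t.map List.length) r.length

-- the width of column i+1 is the width of column i of the tails
theorem pv_W_tail (rows : List (List String)) (i : Nat) :
    pvW (rows.map List.tail) i = pvW rows (i + 1) := by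
  unfold pvW
  rw [List.map_map]
  have h : rows.map ((fun r => (r.getD i "").toList.length) ∘ List.tail)
      = rows.map (fun r => (r.getD (i + 1) "").toList.length) := by
    apply List.map_congr_left
    intro r _
    rcases r with _ | ⟨x, xs⟩ <;> simp [Function.comp]
  rw [h]

-- the head column's width is pvW rows 0
theorem pv_W_head (rows : List (List String)) :
    (PySem.List.max? (rows.map (fun r => (r.headD "").toList.length)) (fun x => x)).getD 0 = pvW rows 0 := by
  unfold pvW
  congr 1
  congr 1
  apply List.map_congr_left
  intro r _
  rcases r with _ | ⟨x, xs⟩ <;> simp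

-- zip a list with its own mapped image, then cons: a single map
theorem pv_zip_map_cons {α γ : Type} (l : List α) (g : α → List γ) (c : α → γ) :
    ((l.zip (l.map g)).map (fun p => c p.1 :: p.2)) = l.map (fun x => c x :: g x) := by
  induction l with
  | nil => rfl
  | cons a t ih => simp_all

-- go computes the middle form (for nonempty rs), by strong induction on the first row's length
theorem pv_go_eq_mid : ∀ (N : Nat) (rs : List (List String)) (left : Bool),
    (rs.headD []).length ≤ N → rs ≠ [] → col_align_go rs left = pvMid rs left := by
  intro N
  induction N with
  | zero =>
    intro rs left hN hne
    rcases rs with _ | ⟨r0, t⟩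
    · exact absurd rfl hne
    · have hr0 : r0 = [] := by
        simpa using List.length_eq_zero_iff.mp (Nat.le_zero.mp (by simpa using hN))
    -- first row empty ⇒ some row empty ⇒ both sides map every row to []
      have hany : (r0 :: t).any (fun r => r.isEmpty) = true := by simp [hr0]
      rw [col_align_go]
      rw [dif_pos (Or.inl hany)]
      unfold pvMid
      rw [(pv_minLen_zero_iff (by simp : (r0 :: t) ≠ [])).mpr hany]
      simp
  | succ n ih =>
    intro rs left hN hne
    by_cases hany : rs.any (fun r => r.isEmpty) = true
    · rw [col_align_go, dif_pos (Or.inl hany)]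
      unfold pvMid
      rw [(pv_minLen_zero_iff hne).mpr hany]
      simp
    · have hcond : ¬ (rs.any (fun r => r.isEmpty) = true ∨ rs = []) := by
        rintro (h | h) <;> [exact hany h; exact hne h]
      rw [col_align_go, dif_neg hcond]
      simp only []
      -- recursive call: tails
      have htne : rs.map List.tail ≠ [] := by
        intro h; exact hne (by simpa using congrArg List.length h)
      have htN : ((rs.map List.tail).headD []).length ≤ n := by
        rcases rs with _ | ⟨r0, t⟩
        · exact absurd rfl hne
        · have hr0 : r0 ≠ [] := fun h => hany (by simp [h])
          have : 1 ≤ r0.length := List.length_pos_iff.mpr hr0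
          simp only [List.map_cons, List.headD_cons, List.length_tail]
          have hhead : r0.length ≤ n + 1 := by simpa using hN
          omega
      rw [ih (rs.map List.tail) left htN htne]
      have hm1 : pvMinLen rs - 1 + 1 = pvMinLen rs := by
        have : pvMinLen rs ≠ 0 := fun h => hany ((pv_minLen_zero_iff hne).mp h)
        omega
      unfold pvMid
      rw [pv_minLen_tail, pv_W_head, List.map_map,
        pv_zip_map_cons rs
          ((fun r => List.map (fun i => pvPad left (pvW (List.map List.tail rs) i) (r.getD i ""))
              (List.range (pvMinLen rs - 1))) ∘ List.tail)
          (fun r => pvPad left (pvW rs 0) (r.headD ""))]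
      rw [show List.range (pvMinLen rs) = 0 :: (List.range (pvMinLen rs - 1)).map Nat.succ from by
        rw [← List.range_succ_eq_map, hm1]]
      simp only [List.map_cons, List.map_map]
      apply List.map_congr_left
      intro r hr
      have hrne : r ≠ [] := by
        intro h
        exact hany (List.any_eq_true.mpr ⟨r, hr, by simp [h]⟩)
      rcases r with _ | ⟨x, xs⟩
      · exact absurd rfl hrne
      · simp only [Function.comp]
        congr 1
        apply List.map_congr_left
        intro i _
        rw [pv_W_tail]
        simp

theorem col_align_eq (rows : List (List String)) (left : Bool) :
    col_align rows left = col_align_alt rows left := by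
  by_cases hr : rows = []
  · subst hr; rfl
  · by_cases hany : rows.any (fun r => r.isEmpty) = true
    · -- some row empty: both sides are []
      have hm0 : pvMinLen rows = 0 := (pv_minLen_zero_iff hr).mpr hany
      have hz : pvZipStar rows = [] := by
        unfold pvZipStar
        rw [show (PySem.List.min? (rows.map List.length) (fun x => x)).getD 0 = pvMinLen rows from rfl, hm0]
        rfl
      have hA : col_align rows left = [] := by
        simp only [col_align, hz]
        rfl
      rw [hA]
      simp [col_align_alt, hany]
    · have hm : pvMinLen rows ≠ 0 := fun h => hany ((pv_minLen_zero_iff hr).mp h)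
      rw [pv_A_eq_mid rows left hr hm]
      unfold col_align_alt
      rw [if_neg (by rintro (h | h) <;> [exact hr h; exact hany h])]
      exact (pv_go_eq_mid (rows.headD []).length rows left le_rfl hr).symm

-- ===== VERDICT (by name: the statement is the Claim_ definition above) =====
theorem col_align_spec : Claim_equal_col_align := by
  intro rows left _
  exact col_align_eq rows left
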